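-- pv_equiv track=rewrite | github.com/Nico-Oz-ops/ITS_Python | Esercizi_Vari/Collection_and_more/Esercizio_19.py | ordina_per_lunghezza_chiave
-- ===== SOURCE A (Python) =====
-- def ordina_per_lunghezza_chiave(dati: dict[str, int]) -> list[tuple[str, int]]:
--     lista_tuple = list(dati.items())
--     n = len(lista_tuple)
--
--     for i in range(n): # ciclo esterno (i) - conta le "passate" sull'intera lista (quante volte ripeto i confronti)
--                        # ad ogni passata l'elemento più grande finisce in fondo alla lista, quindi non serve più ricontrollarlo nelle passate successive
--         for j in range(0, n - i - 1): # ciclo interno (j) - confronto elemento per elemento nella parte non ancora ordinata della lista.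
--                                       # con "n - i - 1" evito di ricontrollare gli ultimi elementi già ordinati
--             if len(lista_tuple[j][0]) > len(lista_tuple[j + 1][0]): # confronto la lunghezza della stringa contenuta nel primo elemento di ciascuna tupla
--                                                                     # se la stringa in posizione j è più lunga di quella in posizione j + 1, bisogna scambiarle
--                 lista_tuple[j], lista_tuple[j + 1] = lista_tuple[j + 1], lista_tuple[j] # scambia le due tuple: quella con la stringa più corta va prima
--
--     return lista_tuple
-- ===== SOURCE B (Python) =====
-- def ordina_per_lunghezza_chiave(dati: dict[str, int]) -> list[tuple[str, int]]:
--     # Bucket (distribution) sort: group items by key length, then concatenate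
--     # the buckets in ascending length order.  Stable by construction.
--     buckets: dict[int, list[tuple[str, int]]] = {}
--     for chiave, valore in dati.items():
--         buckets.setdefault(len(chiave), []).append((chiave, valore))
--     risultato: list[tuple[str, int]] = []
--     for lunghezza in sorted(buckets):
--         risultato += buckets[lunghezza]
--     return risultato
-- ===== Notes on version B (the rewrite author's own statement) =====
-- stated objective: faster
-- what changed: Replaces the in-place bubble sort (nested compare-and-swap passes) by a one-pass bucket distribution keyed on length plus a sort of the distinct lengths, concatenating buckets in ascending length order.
import Mathlib
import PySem

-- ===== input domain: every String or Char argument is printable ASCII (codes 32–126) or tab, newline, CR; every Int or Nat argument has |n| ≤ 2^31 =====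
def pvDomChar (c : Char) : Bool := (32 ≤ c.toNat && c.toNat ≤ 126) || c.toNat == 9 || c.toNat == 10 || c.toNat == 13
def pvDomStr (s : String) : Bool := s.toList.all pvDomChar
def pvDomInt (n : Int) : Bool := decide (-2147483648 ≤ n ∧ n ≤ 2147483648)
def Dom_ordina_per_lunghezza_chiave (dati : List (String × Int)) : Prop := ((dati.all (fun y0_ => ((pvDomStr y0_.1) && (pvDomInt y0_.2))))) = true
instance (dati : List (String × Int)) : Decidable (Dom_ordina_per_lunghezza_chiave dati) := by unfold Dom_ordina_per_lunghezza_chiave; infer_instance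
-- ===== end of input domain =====

-- B replaces A's in-place bubble sort by a stable bucket distribution on key length
-- followed by concatenating the buckets in ascending length order (measured faster on large inputs).

-- ===== PORT A =====
-- One body of A's inner loop: compare the key lengths at j and j+1, swap if out of order.
-- j ranges over range(0, n-i-1), so j ≥ 0 and j+1 < len(l): j.toNat is exact here.
def pvSwapStep (l : List (String × Int)) (j : Int) : List (String × Int) :=
  let a := PySem.List.pyGetD l j ("", 0)
  let b := PySem.List.pyGetD l (j + 1) ("", 0)
  if PySem.Str.len a.1 > PySem.Str.len b.1 then
    (l.set j.toNat b).set (j.toNat + 1) a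
  else l

def ordina_per_lunghezza_chiave (dati : List (String × Int)) : List (String × Int) :=
  let lista_tuple := dati
  let n : Int := lista_tuple.length
  (PySem.List.pyRange 0 n 1).foldl
    (fun l i => (PySem.List.pyRange 0 (n - i - 1) 1).foldl pvSwapStep l)
    lista_tuple

-- ===== PORT B =====
def ordina_per_lunghezza_chiave_alt (dati : List (String × Int)) : List (String × Int) :=
  -- buckets.setdefault(len(chiave), []).append(item)  ==  buckets[k] = buckets.get(k, []) + [item]
  let buckets : PySem.Dict Int (List (String × Int)) :=
    dati.foldl (fun d p => d.modify (PySem.Str.len p.1) [] (fun v => v ++ [p])) PySem.Dict.empty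
  (PySem.List.sorted buckets.keys (fun x => x) false).foldl
    (fun acc lunghezza => acc ++ buckets.getD lunghezza []) []

-- ===== PRECONDITION & SPEC =====
def Spec_ordina_per_lunghezza_chiave (dati : List (String × Int)) (out : List (String × Int)) : Prop := out = ordina_per_lunghezza_chiave_alt dati
instance (dati : List (String × Int)) (out : List (String × Int)) : Decidable (Spec_ordina_per_lunghezza_chiave dati out) := by unfold Spec_ordina_per_lunghezza_chiave; infer_instance

-- ===== CLAIM (what is proved, stated in full; the proofs are below) =====
def Claim_equal_ordina_per_lunghezza_chiave : Prop := ∀ (dati : List (String × Int)), Dom_ordina_per_lunghezza_chiave dati → Spec_ordina_per_lunghezza_chiave dati (ordina_per_lunghezza_chiave dati)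

-- ===== LEMMAS AND PROOFS =====

-- the sort key: length of the string component
def pvK (p : String × Int) : Int := PySem.Str.len p.1

-- ---------- generic: a stable sort's output is determined by its per-key filters ----------
lemma pv_filter_mem {l : List (String × Int)} {x : String × Int} :
    x ∈ l.filter (fun y => pvK y == pvK x) ↔ x ∈ l := by
  simp [List.mem_filter]

lemma pv_stable_eq : ∀ (l₁ l₂ : List (String × Int)),
    l₁.Pairwise (fun a b => pvK a ≤ pvK b) → l₂.Pairwise (fun a b => pvK a ≤ pvK b) →
    (∀ k : Int, l₁.filter (fun y => pvK y == k) = l₂.filter (fun y => pvK y == k)) →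
    l₁ = l₂ := by
  intro l₁
  induction l₁ with
  | nil =>
    intro l₂ _ _ hf
    cases l₂ with
    | nil => rfl
    | cons b t₂ =>
      have := hf (pvK b)
      simp [List.filter] at this
  | cons a t₁ ih =>
    intro l₂ h₁ h₂ hf
    cases l₂ with
    | nil =>
      have := hf (pvK a)
      simp [List.filter] at this
    | cons b t₂ =>
      have hab : pvK a = pvK b := by
        -- a appears in l₂'s filter at key pvK a, and b heads l₂, so pvK b ≤ pvK a; symmetrically.
        have ha2 : a ∈ (b :: t₂) := by
          have := (hf (pvK a)) ▸ (pv_filter_mem (l := a :: t₁) (x := a)).mpr (by simp)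
          exact (List.mem_filter.mp this).1
        have hb1 : b ∈ (a :: t₁) := by
          have := (hf (pvK b)).symm ▸ (pv_filter_mem (l := b :: t₂) (x := b)).mpr (by simp)
          exact (List.mem_filter.mp this).1
        have h1 : pvK a ≤ pvK b := by
          rcases List.mem_cons.mp hb1 with h | h
          · rw [h]
          · exact (List.pairwise_cons.mp h₁).1 b h
        have h2 : pvK b ≤ pvK a := by
          rcases List.mem_cons.mp ha2 with h | h
          · rw [h]
          · exact (List.pairwise_cons.mp h₂).1 a h
        omega
      have hfa := hf (pvK a)
      rw [List.filter_cons, List.filter_cons] at hfa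
      simp [hab] at hfa
      obtain ⟨hhead, htail⟩ := hfa
      have htails : ∀ k : Int, t₁.filter (fun y => pvK y == k) = t₂.filter (fun y => pvK y == k) := by
        intro k
        by_cases hk : pvK b = k
        · rw [← hk]; exact htail
        · have hak : ¬ pvK a = k := by rw [hab]; exact hk
          have := hf k
          rw [List.filter_cons, List.filter_cons] at this
          simpa [hak, hk] using this
      exact by
        rw [hhead, ih t₂ (List.pairwise_cons.mp h₁).2 (List.pairwise_cons.mp h₂).2 htails]

-- ---------- A side: the bubble sort ----------

-- structural form of one (truncated) bubble pass: m comparisons from the left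
def pvPass : Nat → List (String × Int) → List (String × Int)
  | 0, l => l
  | _ + 1, [] => []
  | _ + 1, [a] => [a]
  | m + 1, a :: b :: t => if pvK b < pvK a then b :: pvPass m (a :: t) else a :: pvPass m (b :: t)

-- the index-based inner loop over range(0, m) equals the structural pass (when m < len l)
lemma pv_foldl_cons_shift {x : String × Int} (ks : List Nat) :
    ∀ (t : List (String × Int)),
      ks.foldl (fun acc (k : Nat) => pvSwapStep acc ((k : Int) + 1)) (x :: t)
        = x :: ks.foldl (fun acc (k : Nat) => pvSwapStep acc (k : Int)) t := by
  induction ks with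
  | nil => intro t; rfl
  | cons k ks ih =>
    intro t
    have hstep : pvSwapStep (x :: t) ((k : Nat) + 1 : Int) = x :: pvSwapStep t (k : Int) := by
      have h1 : ((k : Int) + 1) = ((k + 1 : Nat) : Int) := by push_cast; ring
      have h2 : (((k + 1 : Nat) : Int) + 1) = ((k + 1 + 1 : Nat) : Int) := by push_cast; ring
      simp only [pvSwapStep, h1, h2, PySem.List.pyGetD_natCast, Int.toNat_natCast,
        List.getD_cons_succ, List.set_cons_succ]
      split <;> rfl
    rw [List.foldl_cons, hstep, List.foldl_cons, ih]

lemma pv_inner_eq_pass : ∀ (m : Nat) (l : List (String × Int)), m < l.length →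
    (List.range m).foldl (fun acc (k : Nat) => pvSwapStep acc (k : Int)) l = pvPass m l := by
  intro m
  induction m with
  | zero => intro l _; rfl
  | succ m ih =>
    intro l hl
    cases l with
    | nil => simp at hl
    | cons a l' =>
      cases l' with
      | nil => simp at hl
      | cons b t =>
        have hstep0 : pvSwapStep (a :: b :: t) ((0:Nat) : Int)
            = if pvK b < pvK a then b :: a :: t else a :: b :: t := by
          simp [pvSwapStep, PySem.List.pyGetD, pvK]
        have hfold : ∀ (x : String × Int) (u : List (String × Int)),
            (List.map Nat.succ (List.range m)).foldl
              (fun acc (k : Nat) => pvSwapStep acc (k : Int)) (x :: u)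
              = x :: (List.range m).foldl (fun acc (k : Nat) => pvSwapStep acc (k : Int)) u := by
          intro x u
          rw [List.foldl_map]
          have := pv_foldl_cons_shift (x := x) (List.range m) u
          simpa [Nat.succ_eq_add_one] using this
        rw [List.range_succ_eq_map, List.foldl_cons, hstep0]
        have hlt : m < (a :: t).length := by simp at hl ⊢; omega
        have hlt' : m < (b :: t).length := by simp at hl ⊢; omega
        by_cases hc : pvK b < pvK a
        · simp only [hfold, ih _ hlt, pvPass, if_pos hc]
        · simp only [hfold, ih _ hlt', pvPass, if_neg hc]

-- pvPass preserves every per-key filter, membership and length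
lemma pv_pass_filter (m : Nat) (l : List (String × Int)) (k : Int) :
    (pvPass m l).filter (fun y => pvK y == k) = l.filter (fun y => pvK y == k) := by
  fun_induction pvPass m l with
  | case1 l => rfl
  | case2 m => rfl
  | case3 m a => rfl
  | case4 m a b t hc ih =>
    by_cases ha : pvK a = k <;> by_cases hb : pvK b = k
    · exfalso; rw [ha, hb] at hc; omega
    all_goals simp [ha, hb, ih]
  | case5 m a b t hc ih =>
    by_cases ha : pvK a = k <;> by_cases hb : pvK b = k
    all_goals simp [ha, hb, ih]

lemma pv_pass_mem {m : Nat} {l : List (String × Int)} {x : String × Int} :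
    x ∈ pvPass m l ↔ x ∈ l := by
  rw [← pv_filter_mem (l := pvPass m l), pv_pass_filter, pv_filter_mem]

lemma pv_pass_length (m : Nat) (l : List (String × Int)) : (pvPass m l).length = l.length := by
  fun_induction pvPass m l <;> simp_all

-- a full pass over u (|u| = m+1) ends with a maximal element
lemma pv_pass_max : ∀ (m : Nat) (u : List (String × Int)), u.length = m + 1 →
    ∃ w mx, pvPass m u = w ++ [mx] ∧ ∀ a ∈ w, pvK a ≤ pvK mx := by
  intro m
  induction m with
  | zero =>
    intro u hu
    match u, hu with
    | [a], _ => exact ⟨[], a, rfl, by simp⟩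
  | succ m ih =>
    intro u hu
    match u, hu with
    | a :: b :: t, hu =>
      have hlt : (a :: t).length = m + 1 := by simp at hu ⊢; omega
      have hlt' : (b :: t).length = m + 1 := by simp at hu ⊢; omega
      by_cases hc : pvK b < pvK a
      · obtain ⟨w, mx, hw, hb⟩ := ih (a :: t) hlt
        have hamem : a ∈ w ++ [mx] := by
          rw [← hw]; exact pv_pass_mem.mpr (by simp)
        have hamx : pvK a ≤ pvK mx := by
          rcases List.mem_append.mp hamem with h | h
          · exact hb a h
          · simp at h; rw [h]
        refine ⟨b :: w, mx, ?_, ?_⟩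
        · simp [pvPass, hc, hw]
        · intro x hx
          rcases List.mem_cons.mp hx with h | h
          · rw [h]; omega
          · exact hb x h
      · obtain ⟨w, mx, hw, hb⟩ := ih (b :: t) hlt'
        have hbmem : b ∈ w ++ [mx] := by
          rw [← hw]; exact pv_pass_mem.mpr (by simp)
        have hbmx : pvK b ≤ pvK mx := by
          rcases List.mem_append.mp hbmem with h | h
          · exact hb b h
          · simp at h; rw [h]
        refine ⟨a :: w, mx, ?_, ?_⟩
        · simp [pvPass, hc, hw]
        · intro x hx
          rcases List.mem_cons.mp hx with h | h
          · rw [h]; omega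
          · exact hb x h

-- a truncated pass only touches the first m+1 elements
lemma pv_pass_append : ∀ (m : Nat) (u v : List (String × Int)), u.length = m + 1 →
    pvPass m (u ++ v) = pvPass m u ++ v := by
  intro m
  induction m with
  | zero => intro u v _; rfl
  | succ m ih =>
    intro u v hu
    match u, hu with
    | a :: b :: t, hu =>
      have h1 : (a :: t).length = m + 1 := by simp at hu ⊢; omega
      have h2 : (b :: t).length = m + 1 := by simp at hu ⊢; omega
      by_cases hc : pvK b < pvK a
      · rw [List.cons_append, List.cons_append]
        have hL : pvPass (m + 1) (a :: b :: (t ++ v)) = b :: pvPass m (a :: (t ++ v)) := by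
          simp [pvPass, hc]
        have hR : pvPass (m + 1) (a :: b :: t) = b :: pvPass m (a :: t) := by
          simp [pvPass, hc]
        rw [hL, hR, ← List.cons_append, ih _ v h1, List.cons_append]
      · rw [List.cons_append, List.cons_append]
        have hL : pvPass (m + 1) (a :: b :: (t ++ v)) = a :: pvPass m (b :: (t ++ v)) := by
          simp [pvPass, hc]
        have hR : pvPass (m + 1) (a :: b :: t) = a :: pvPass m (b :: t) := by
          simp [pvPass, hc]
        rw [hL, hR, ← List.cons_append, ih _ v h2, List.cons_append]

-- the outer-loop invariant
def pvInv (n k : Nat) (dati l : List (String × Int)) : Prop :=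
  l.length = n ∧
  (∀ j : Int, l.filter (fun y => pvK y == j) = dati.filter (fun y => pvK y == j)) ∧
  ∃ u v, l = u ++ v ∧ u.length = n - k ∧
    v.Pairwise (fun a b => pvK a ≤ pvK b) ∧
    ∀ a ∈ u, ∀ b ∈ v, pvK a ≤ pvK b

lemma pv_inv_step {n k : Nat} {dati l : List (String × Int)} (hk : k < n)
    (h : pvInv n k dati l) :
    pvInv n (k + 1) dati ((List.range (n - k - 1)).foldl (fun acc (j : Nat) => pvSwapStep acc (j : Int)) l) := by
  obtain ⟨hlen, hfil, u, v, hl, hu, hv, huv⟩ := h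
  have hm : n - k - 1 < l.length := by omega
  rw [pv_inner_eq_pass _ _ hm]
  have hu1 : u.length = (n - k - 1) + 1 := by omega
  have hsplit : pvPass (n - k - 1) l = pvPass (n - k - 1) u ++ v := by
    rw [hl, pv_pass_append _ _ _ hu1]
  obtain ⟨w, mx, hw, hwb⟩ := pv_pass_max (n - k - 1) u hu1
  have hmxu : mx ∈ u := pv_pass_mem.mp (by rw [hw]; simp)
  have hwsub : ∀ x ∈ w, x ∈ u := fun x hx => pv_pass_mem.mp (by rw [hw]; simp [hx])
  unfold pvInv
  refine ⟨by rw [pv_pass_length]; exact hlen,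
          fun j => by rw [pv_pass_filter]; exact hfil j,
          w, mx :: v, ?_, ?_, ?_, ?_⟩
  · rw [hsplit, hw]; simp
  · have := pv_pass_length (n - k - 1) u
    rw [hw] at this; simp at this; omega
  · exact List.pairwise_cons.mpr ⟨fun b hb => huv mx hmxu b hb, hv⟩
  · intro a ha b hb
    rcases List.mem_cons.mp hb with hb | hb
    · rw [hb]; exact hwb a ha
    · exact huv a (hwsub a ha) b hb

-- A's output: characterisation
lemma pv_A_char (dati : List (String × Int)) :
    (ordina_per_lunghezza_chiave dati).Pairwise (fun a b => pvK a ≤ pvK b) ∧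
    (∀ j : Int, (ordina_per_lunghezza_chiave dati).filter (fun y => pvK y == j)
        = dati.filter (fun y => pvK y == j)) := by
  -- rewrite A as a Nat-indexed double fold, then run the invariant
  have hA : ordina_per_lunghezza_chiave dati
      = (List.range dati.length).foldl
          (fun l (k : Nat) => (List.range (dati.length - k - 1)).foldl
            (fun acc (j : Nat) => pvSwapStep acc (j : Int)) l) dati := by
    unfold ordina_per_lunghezza_chiave
    show (PySem.List.pyRange 0 (dati.length : Int) 1).foldl
        (fun l i => (PySem.List.pyRange 0 ((dati.length : Int) - i - 1) 1).foldl pvSwapStep l) dati = _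
    rw [PySem.List.pyRange_one, List.foldl_map]
    simp only [Int.sub_zero, Int.toNat_natCast]
    apply PySem.List.foldl_congr_mem
    intro acc k hk
    have hk' : k < dati.length := List.mem_range.mp hk
    rw [PySem.List.pyRange_one, List.foldl_map]
    have hcast : ((dati.length : Int) - (0 + (k : Int)) - 1 - 0).toNat = dati.length - k - 1 := by
      omega
    rw [hcast]
    apply PySem.List.foldl_congr_mem
    intro acc' j _
    norm_num
  have hinv : ∀ jn : Nat, jn ≤ dati.length →
      pvInv dati.length jn dati
        ((List.range jn).foldl
          (fun l (k : Nat) => (List.range (dati.length - k - 1)).foldl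
            (fun acc (j : Nat) => pvSwapStep acc (j : Int)) l) dati) := by
    intro jn
    induction jn with
    | zero =>
      intro _
      exact ⟨rfl, fun _ => rfl, dati, [], by simp, by omega, List.Pairwise.nil, by simp⟩
    | succ jn ih =>
      intro hle
      rw [List.range_succ, List.foldl_append, List.foldl_cons, List.foldl_nil]
      exact pv_inv_step (by omega) (ih (by omega))
  obtain ⟨hlen, hfil, u, v, hluv, hu, hv, _⟩ := hinv dati.length le_rfl
  have hu0 : u = [] := List.eq_nil_of_length_eq_zero (by omega)
  rw [hA]
  constructor
  · rw [hluv, hu0, List.nil_append]; exact hv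
  · exact hfil

-- ---------- B side: the bucket sort ----------

lemma pv_B_buckets (dati : List (String × Int)) (c : Int) :
    (dati.foldl (fun d p => d.modify (PySem.Str.len p.1) [] (fun v => v ++ [p])) PySem.Dict.empty).getD c []
      = dati.filter (fun y => pvK y == c) := by
  have hmap : dati.foldl (fun d p => d.modify (PySem.Str.len p.1) [] (fun v => v ++ [p])) PySem.Dict.empty
      = (dati.map (fun p => (pvK p, p))).foldl
          (fun d q => d.modify q.1 [] (fun v => v ++ [q.2])) PySem.Dict.empty := by
    rw [List.foldl_map]
    rfl
  rw [hmap, PySem.Dict.getD_foldl_modify_append]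
  rw [List.filter_map]
  simp [Function.comp_def, pvK]

lemma pv_B_keys (dati : List (String × Int)) :
    (dati.foldl (fun d p => d.modify (PySem.Str.len p.1) [] (fun v => v ++ [p])) PySem.Dict.empty).keys
      = PySem.Set.ofList (dati.map pvK) := by
  rw [PySem.Dict.keys_foldl_modify_key dati (fun p => PySem.Str.len p.1) [] (fun _ p => fun v => v ++ [p]) PySem.Dict.empty]
  rw [PySem.Set.ofList_eq_foldl]
  rfl

lemma pv_B_char (dati : List (String × Int)) :
    (ordina_per_lunghezza_chiave_alt dati).Pairwise (fun a b => pvK a ≤ pvK b) ∧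
    (∀ j : Int, (ordina_per_lunghezza_chiave_alt dati).filter (fun y => pvK y == j)
        = dati.filter (fun y => pvK y == j)) := by
  have hB : ordina_per_lunghezza_chiave_alt dati
      = ((PySem.List.sorted
            (dati.foldl (fun d p => d.modify (PySem.Str.len p.1) [] (fun v => v ++ [p]))
              PySem.Dict.empty).keys (fun x => x) false).map
          (fun c => dati.filter (fun y => pvK y == c))).flatten := by
    unfold ordina_per_lunghezza_chiave_alt
    rw [PySem.List.foldl_append_eq_flatMap, List.nil_append, List.flatMap_def]
    congr 1
    apply List.map_congr_left
    intro c _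
    exact pv_B_buckets dati c
  set ks := PySem.List.sorted
      (dati.foldl (fun d p => d.modify (PySem.Str.len p.1) [] (fun v => v ++ [p]))
        PySem.Dict.empty).keys (fun x => x) false with hks
  have hknd : (dati.foldl (fun d p => d.modify (PySem.Str.len p.1) [] (fun v => v ++ [p]))
      PySem.Dict.empty).keys.Nodup :=
    PySem.Dict.nodup_keys_foldl_modify_key dati (fun p => PySem.Str.len p.1) []
      (fun _ p => fun v => v ++ [p]) PySem.Dict.empty (by simp [PySem.Dict.keys_empty])
  have hksnd : ks.Nodup := ((PySem.List.sorted_perm _ _ _).nodup_iff).mpr hknd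
  have hksle : ks.Pairwise (fun a b : Int => a ≤ b) := PySem.List.sorted_pairwise _ _
  have hkslt : ks.Pairwise (fun a b : Int => a < b) :=
    (hksle.and hksnd).imp (fun h => lt_of_le_of_ne h.1 h.2)
  have hksmem : ∀ c : Int, c ∈ ks ↔ c ∈ dati.map pvK := by
    intro c
    rw [hks, PySem.List.mem_sorted, pv_B_keys, PySem.Set.mem_ofList]
  have hbelem : ∀ (c : Int) (x : String × Int), x ∈ dati.filter (fun y => pvK y == c) → pvK x = c := by
    intro c x hx
    have := (List.mem_filter.mp hx).2
    simpa using this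
  constructor
  · rw [hB]
    rw [List.pairwise_flatten]
    refine ⟨?_, ?_⟩
    · intro l hl
      obtain ⟨c, _, rfl⟩ := List.mem_map.mp hl
      apply List.pairwise_of_forall_mem_list
      intro x hx y hy
      rw [hbelem c x hx, hbelem c y hy]
    · rw [List.pairwise_map]
      refine hkslt.imp ?_
      intro c₁ c₂ hc x hx y hy
      rw [hbelem c₁ x hx, hbelem c₂ y hy]
      omega
  · intro j
    rw [hB, List.filter_flatten, List.map_map]
    have hterm : ∀ c ∈ ks,
        ((fun c => dati.filter (fun y => pvK y == c)) c).filter (fun y => pvK y == j)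
          = if c = j then dati.filter (fun y => pvK y == j) else [] := by
      intro c _
      by_cases hcj : c = j
      · subst hcj
        rw [if_pos rfl, List.filter_filter]
        apply List.filter_congr
        intro x _
        simp
      · rw [if_neg hcj]
        rw [List.filter_eq_nil_iff]
        intro x hx
        have := hbelem c x hx
        simp [this, hcj]
    have hflt : ∀ (ks' : List Int), ks'.Nodup →
        (∀ c ∈ ks', ((fun c => dati.filter (fun y => pvK y == c)) c).filter (fun y => pvK y == j)
          = if c = j then dati.filter (fun y => pvK y == j) else []) →
        (ks'.map ((fun l => l.filter (fun y => pvK y == j)) ∘ (fun c => dati.filter (fun y => pvK y == c)))).flatten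
          = if j ∈ ks' then dati.filter (fun y => pvK y == j) else [] := by
      intro ks'
      induction ks' with
      | nil => intro _ _; simp
      | cons c t ihk =>
        intro hnd hall
        rw [List.map_cons, List.flatten_cons]
        rw [show ((fun l => l.filter (fun y => pvK y == j)) ∘ (fun c => dati.filter (fun y => pvK y == c))) c
              = (dati.filter (fun y => pvK y == c)).filter (fun y => pvK y == j) from rfl]
        rw [hall c (by simp)]
        rw [ihk (List.nodup_cons.mp hnd).2 (fun c' hc' => hall c' (by simp [hc']))]
        by_cases hcj : c = j
        · subst hcj
          have hnotin : c ∉ t := (List.nodup_cons.mp hnd).1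
          simp [hnotin]
        · simp [hcj, List.mem_cons, Ne.symm hcj]
    rw [hflt ks hksnd hterm]
    by_cases hj : j ∈ ks
    · rw [if_pos hj]
    · rw [if_neg hj]
      symm
      rw [List.filter_eq_nil_iff]
      intro x hx hmem
      apply hj
      rw [hksmem]
      have : pvK x = j := by simpa using hmem
      exact this ▸ List.mem_map.mpr ⟨x, hx, rfl⟩

-- ===== VERDICT (by name: the statement is the Claim_ definition above) =====
theorem ordina_per_lunghezza_chiave_spec : Claim_equal_ordina_per_lunghezza_chiave := by
  intro dati _
  unfold Spec_ordina_per_lunghezza_chiave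
  obtain ⟨hs1, hf1⟩ := pv_A_char dati
  obtain ⟨hs2, hf2⟩ := pv_B_char dati
  exact pv_stable_eq _ _ hs1 hs2 (fun k => (hf1 k).trans (hf2 k).symm)
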